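-- pv_equiv track=rewrite | github.com/VectorG0ld/SISTEMA-LCDPR | Importação DANFE/Importador XML.py | _pick_owner_for_context
-- ===== SOURCE A (Python) =====
-- def _pick_owner_for_context(owner_flags: dict, current_owner: str):
--     """
--     Decide qual owner usar e de que lado ('emit'|'dest'), com prioridade ao perfil selecionado.
--     """
--     me = owner_flags.get(current_owner, {"emit": False, "dest": False})
--     if me["emit"] or me["dest"]:
--         return current_owner, ("emit" if me["emit"] else "dest")
--     present = [(k, ("emit" if v["emit"] else "dest")) for k, v in owner_flags.items() if v["emit"] or v["dest"]]
--     if len(present) == 1: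
--         return present[0]
--     if len(present) > 1:
--         present.sort(key=lambda kv: kv[0])
--         return present[0]
--     return None, None
-- ===== SOURCE B (Python) =====
-- def _pick_owner_for_context(owner_flags: dict, current_owner: str):
--     """
--     Decide qual owner usar e de que lado ('emit'|'dest'), com prioridade ao perfil selecionado.
--     Single linear min-scan instead of filter-list + sort.
--     """
--     me = owner_flags.get(current_owner, {"emit": False, "dest": False})
--     if me["emit"] or me["dest"]:
--         return current_owner, ("emit" if me["emit"] else "dest")
--     best = None
--     for k, v in owner_flags.items():
--         if (v["emit"] or v["dest"]) and (best is None or k < best[0]):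
--             best = (k, "emit" if v["emit"] else "dest")
--     if best is None:
--         return None, None
--     return best
-- ===== Notes on version B (the rewrite author's own statement) =====
-- stated objective: simpler
-- what changed: Replaces the build-filtered-list + len-branching + sort-by-key with a single linear min-scan over the items that tracks the smallest flagged key and its side, merging the len==1 and len>1 cases.
import Mathlib
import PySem

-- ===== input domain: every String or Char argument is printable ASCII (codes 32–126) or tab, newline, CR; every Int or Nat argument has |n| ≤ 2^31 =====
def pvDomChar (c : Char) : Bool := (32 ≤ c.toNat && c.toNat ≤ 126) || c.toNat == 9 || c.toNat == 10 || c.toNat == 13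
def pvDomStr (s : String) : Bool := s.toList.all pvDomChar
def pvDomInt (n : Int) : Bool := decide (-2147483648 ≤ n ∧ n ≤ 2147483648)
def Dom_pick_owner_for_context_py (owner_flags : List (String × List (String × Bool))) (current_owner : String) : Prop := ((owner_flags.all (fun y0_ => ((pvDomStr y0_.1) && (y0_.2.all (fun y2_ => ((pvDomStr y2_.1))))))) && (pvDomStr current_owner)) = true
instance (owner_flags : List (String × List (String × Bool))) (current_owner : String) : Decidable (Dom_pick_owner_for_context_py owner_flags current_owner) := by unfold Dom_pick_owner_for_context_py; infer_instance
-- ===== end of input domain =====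

-- B replaces A's filter-list + length-branching + sort-by-key with a single linear
-- min-scan over the items (objective: simpler); return values proved equal on Pre_.


-- ===== PORT A =====
-- v["emit"] / v["dest"] on the inner dict; `getD … false` is exact under Pre_, which
-- rules out exactly the KeyError inputs.
def pvFlagged (v : List (String × Bool)) : Bool :=
  (PySem.Dict.ofList v).getD "emit" false || (PySem.Dict.ofList v).getD "dest" false

def pvSide (v : List (String × Bool)) : String :=
  if (PySem.Dict.ofList v).getD "emit" false then "emit" else "dest"

def pick_owner_for_context_py (owner_flags : List (String × List (String × Bool))) (current_owner : String) : Option String × Option String :=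
  let d := PySem.Dict.ofList owner_flags
  -- me = owner_flags.get(current_owner, {"emit": False, "dest": False})
  let me := d.getD current_owner [("emit", false), ("dest", false)]
  if pvFlagged me then
    (some current_owner, some (pvSide me))
  else
    -- present = [(k, side) for k, v in owner_flags.items() if v flagged]
    let present := (d.items.filter (fun kv => pvFlagged kv.2)).map (fun kv => (kv.1, pvSide kv.2))
    if present.length = 1 then
      match present with
      | p :: _ => (some p.1, some p.2)
      | [] => (none, none)
    else if present.length > 1 then
      -- present.sort(key=lambda kv: kv[0]); return present[0]
      match PySem.List.sorted present (fun kv => kv.1) with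
      | p :: _ => (some p.1, some p.2)
      | [] => (none, none)
    else (none, none)

-- ===== PORT B =====
-- the loop body: take kv if it is flagged and its key is smaller than the best so far
def pvScan (best : Option (String × String)) (kv : String × List (String × Bool)) : Option (String × String) :=
  if pvFlagged kv.2 && (match best with | none => true | some b => decide (kv.1 < b.1)) then
    some (kv.1, pvSide kv.2)
  else best

def pick_owner_for_context_py_alt (owner_flags : List (String × List (String × Bool))) (current_owner : String) : Option String × Option String :=
  let d := PySem.Dict.ofList owner_flags
  let me := d.getD current_owner [("emit", false), ("dest", false)]
  if pvFlagged me then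
    (some current_owner, some (pvSide me))
  else
    -- single pass: keep the flagged item with the smallest key
    let best := d.items.foldl pvScan none
    match best with
    | some p => (some p.1, some p.2)
    | none => (none, none)

-- ===== PRECONDITION & SPEC =====
-- A raises KeyError iff an inner dict it actually reads lacks "emit" (or lacks "dest"
-- while "emit" is falsy): first on the selected owner's dict, then — only when that
-- one is unflagged — on every value dict.  Pre_ admits exactly the non-raising inputs.
def pvWellKeyed (v : List (String × Bool)) : Bool :=
  (PySem.Dict.ofList v).contains "emit" &&
    ((PySem.Dict.ofList v).getD "emit" false || (PySem.Dict.ofList v).contains "dest")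

def Pre_pick_owner_for_context_py (owner_flags : List (String × List (String × Bool))) (current_owner : String) : Prop :=
  let me := (PySem.Dict.ofList owner_flags).getD current_owner [("emit", false), ("dest", false)]
  pvWellKeyed me = true ∧
    (pvFlagged me = false →
      ∀ kv ∈ (PySem.Dict.ofList owner_flags).items, pvWellKeyed kv.2 = true)

instance (owner_flags : List (String × List (String × Bool))) (current_owner : String) : Decidable (Pre_pick_owner_for_context_py owner_flags current_owner) := by
  unfold Pre_pick_owner_for_context_py; infer_instance

def pvWitness_pick_owner_for_context_py : (List (String × List (String × Bool))) × String :=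
  ([("ana", [("emit", false), ("dest", true)]), ("bob", [("emit", true), ("dest", false)])], "zoe")

def Spec_pick_owner_for_context_py (owner_flags : List (String × List (String × Bool))) (current_owner : String) (out : Option String × Option String) : Prop := out = pick_owner_for_context_py_alt owner_flags current_owner
instance (owner_flags : List (String × List (String × Bool))) (current_owner : String) (out : Option String × Option String) : Decidable (Spec_pick_owner_for_context_py owner_flags current_owner out) := by unfold Spec_pick_owner_for_context_py; infer_instance

-- ===== CLAIM (what is proved, stated in full; the proofs are below) =====
def Claim_equal_pick_owner_for_context_py : Prop := ∀ (owner_flags : List (String × List (String × Bool))) (current_owner : String), Dom_pick_owner_for_context_py owner_flags current_owner → Pre_pick_owner_for_context_py owner_flags current_owner → Spec_pick_owner_for_context_py owner_flags current_owner (pick_owner_for_context_py owner_flags current_owner)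

-- ===== LEMMAS AND PROOFS =====

-- B's fold body restated over the already-projected (key, side) pairs
def pvStep (b : Option (String × String)) (p : String × String) : Option (String × String) :=
  if (match b with | none => true | some q => decide (p.1 < q.1)) then some p else b

theorem pvScan_eq (b : Option (String × String)) (kv : String × List (String × Bool)) :
    pvScan b kv = if pvFlagged kv.2 then pvStep b (kv.1, pvSide kv.2) else b := by
  unfold pvScan pvStep
  cases pvFlagged kv.2
  · simp
  · simp

-- B's fold over the items equals the same min-fold over A's `present` list
theorem pv_fold_eq_fold_present (l : List (String × List (String × Bool))) (b : Option (String × String)) :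
    l.foldl pvScan b
      = ((l.filter (fun kv => pvFlagged kv.2)).map (fun kv => (kv.1, pvSide kv.2))).foldl pvStep b := by
  induction l generalizing b with
  | nil => rfl
  | cons kv t ih =>
      rw [List.foldl_cons, pvScan_eq, List.filter_cons]
      cases pvFlagged kv.2
      · simp [ih]
      · simp [ih]

theorem pv_fold_some (l : List (String × String)) (b : String × String) :
    ∃ m, l.foldl pvStep (some b) = some m ∧ (m = b ∨ m ∈ l) ∧ m.1 ≤ b.1 ∧ ∀ y ∈ l, m.1 ≤ y.1 := by
  induction l generalizing b with
  | nil => exact ⟨b, rfl, Or.inl rfl, le_refl _, by simp⟩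
  | cons p t ih =>
      simp only [List.foldl_cons, pvStep]
      by_cases h : p.1 < b.1
      · simp only [h, decide_true, if_true]
        obtain ⟨m, hm, hmem, hle, hall⟩ := ih p
        refine ⟨m, hm, ?_, le_of_lt (lt_of_le_of_lt hle h), ?_⟩
        · rcases hmem with h2 | h2 <;> simp [h2]
        · intro y hy
          rcases List.mem_cons.1 hy with h2 | h2
          · subst h2; exact hle
          · exact hall y h2
      · simp only [h, decide_false, Bool.false_eq_true, if_false]
        obtain ⟨m, hm, hmem, hle, hall⟩ := ih b
        refine ⟨m, hm, ?_, hle, ?_⟩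
        · rcases hmem with h2 | h2 <;> simp [h2]
        · intro y hy
          rcases List.mem_cons.1 hy with h2 | h2
          · subst h2; exact le_trans hle (le_of_not_gt h)
          · exact hall y h2

theorem pv_fold_min (l : List (String × String)) (p : String × String) :
    ∃ m, ((p :: l).foldl pvStep none = some m) ∧ m ∈ p :: l ∧ ∀ y ∈ p :: l, m.1 ≤ y.1 := by
  have h0 : (p :: l).foldl pvStep none = l.foldl pvStep (some p) := by
    simp [List.foldl_cons, pvStep]
  obtain ⟨m, hm, hmem, hle, hall⟩ := pv_fold_some l p
  refine ⟨m, h0 ▸ hm, ?_, ?_⟩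
  · rcases hmem with h2 | h2 <;> simp [h2]
  · intro y hy
    rcases List.mem_cons.1 hy with h2 | h2
    · subst h2; exact hle
    · exact hall y h2

-- two minima of a list with pairwise-distinct keys coincide
theorem pv_min_unique (l : List (String × String)) (hnd : (l.map Prod.fst).Nodup)
    (m m' : String × String)
    (hm : m ∈ l ∧ ∀ y ∈ l, m.1 ≤ y.1) (hm' : m' ∈ l ∧ ∀ y ∈ l, m'.1 ≤ y.1) : m = m' := by
  have hkey : m.1 = m'.1 := le_antisymm (hm.2 m' hm'.1) (hm'.2 m hm.1)
  exact List.inj_on_of_nodup_map hnd hm.1 hm'.1 hkey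

-- keys of A's `present` list are pairwise distinct
theorem pv_present_nodup (owner_flags : List (String × List (String × Bool))) :
    ((((PySem.Dict.ofList owner_flags).items.filter (fun kv => pvFlagged kv.2)).map
        (fun kv => (kv.1, pvSide kv.2))).map Prod.fst).Nodup := by
  have hnd := PySem.Dict.nodup_keys_ofList owner_flags
  simp only [PySem.Dict.keys] at hnd
  have hsub : (((PySem.Dict.ofList owner_flags).items.filter (fun kv => pvFlagged kv.2)).map
      (fun kv : String × List (String × Bool) => kv.1)).Sublist
      ((PySem.Dict.ofList owner_flags).items.map (fun kv => kv.1)) :=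
    List.Sublist.map _ List.filter_sublist
  have hnodup := hsub.nodup hnd
  simpa [List.map_map, Function.comp] using hnodup

-- core: A's filter/len-branch/sort result equals the min-fold result, given distinct keys
theorem pv_core (l : List (String × String)) (hnd : (l.map Prod.fst).Nodup) :
    (if l.length = 1 then
      match l with
      | p :: _ => (some p.1, some p.2)
      | [] => ((none : Option String), (none : Option String))
     else if l.length > 1 then
      match PySem.List.sorted l (fun kv => kv.1) with
      | p :: _ => (some p.1, some p.2)
      | [] => (none, none)
     else (none, none))
    = (match l.foldl pvStep none with
       | some p => (some p.1, some p.2)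
       | none => (none, none)) := by
  match l with
  | [] => rfl
  | [p] => simp [pvStep]
  | p :: q :: t =>
      obtain ⟨m, hm, hmem, hall⟩ := pv_fold_min (q :: t) p
      rw [hm]
      have hlen1 : ¬((p :: q :: t).length = 1) := by simp
      have hlen2 : (p :: q :: t).length > 1 := by simp
      rw [if_neg hlen1, if_pos hlen2]
      cases hs : PySem.List.sorted (p :: q :: t) (fun kv => kv.1) with
      | nil => exact absurd ((PySem.List.sorted_eq_nil_iff _ _ _).1 hs) (by simp)
      | cons s st =>
          have hsmem : s ∈ p :: q :: t := by
            have hmem' : s ∈ PySem.List.sorted (p :: q :: t) (fun kv => kv.1) := by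
              rw [hs]; exact List.mem_cons_self
            exact (PySem.List.mem_sorted _ _ _ _).1 hmem'
          have hsall : ∀ y ∈ p :: q :: t, s.1 ≤ y.1 := by
            simpa using PySem.List.key_head_sorted_le _ _ hs
          have hsm : s = m := pv_min_unique _ hnd s m ⟨hsmem, hsall⟩ ⟨hmem, hall⟩
          simp [hsm]

-- ===== VERDICT (by name: the statement is the Claim_ definition above) =====
theorem pick_owner_for_context_py_spec : Claim_equal_pick_owner_for_context_py := by
  intro owner_flags current_owner _ _
  unfold Spec_pick_owner_for_context_py pick_owner_for_context_py pick_owner_for_context_py_alt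
  by_cases hme : pvFlagged ((PySem.Dict.ofList owner_flags).getD current_owner [("emit", false), ("dest", false)]) = true
  · simp only [hme, if_true]
  · simp only [hme, Bool.false_eq_true, if_false]
    rw [pv_fold_eq_fold_present]
    exact pv_core _ (pv_present_nodup owner_flags)
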